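-- pv_equiv track=rewrite | github.com/sungsikyang92/AlgoS | section04/03.py | dvd_Min_Storage
-- ===== SOURCE A (Python) =====
-- def dvd_Count(r_time, mid_time):
--     cnt = 1
--     sum = 0
--     for i in r_time:
--         if sum + i > mid_time:
--             cnt += 1
--             sum = i
--         else:
--             sum += i
--     return cnt
--
-- def dvd_Min_Storage(r_time, m):
--     min_time = 1
--     max_time = sum(r_time)
--     result = 0
--     while min_time <= max_time:
--         mid_time = (min_time + max_time) // 2
--         if dvd_Count(r_time, mid_time) <= m:
--             result = mid_time
--             max_time = mid_time - 1
--         else: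
--             min_time = mid_time + 1
--     return result
-- ===== SOURCE B (Python) =====
-- def dvd_Count(r_time, mid_time):
--     cnt = 1
--     sum = 0
--     for i in r_time:
--         if sum + i > mid_time:
--             cnt += 1
--             sum = i
--         else:
--             sum += i
--     return cnt
--
-- def next_change(r_time, t):
--     # smallest overflow value sum+i observed by the greedy run at threshold t
--     # (the count function is constant on [t, next_change-1]), or None if no overflow
--     nxt = None
--     sum = 0
--     for i in r_time:
--         if sum + i > t:
--             if nxt is None or sum + i < nxt:
--                 nxt = sum + i
--             sum = i
--         else:
--             sum += i
--     return nxt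
--
-- def dvd_Min_Storage(r_time, m):
--     total = sum(r_time)
--     t = 1
--     while t <= total:
--         if dvd_Count(r_time, t) <= m:
--             return t
--         nxt = next_change(r_time, t)
--         t = nxt if nxt is not None else total + 1
--     return 0
-- ===== Notes on version B (the rewrite author's own statement) =====
-- stated objective: alternative
-- what changed: Replaces the binary search over thresholds by an event-driven forward jump scan: starting at t=1, it tests feasibility with the unchanged greedy dvd_Count and, when infeasible, jumps t directly to the smallest overflow value sum+i observed by the greedy run (the count function is constant below that breakpoint), returning the first feasible threshold.
-- outside the precondition, e.g. on dvd_Min_Storage([-2, 12, -8, 10, -2], 3): A returns 8, B returns 2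
import Mathlib
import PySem

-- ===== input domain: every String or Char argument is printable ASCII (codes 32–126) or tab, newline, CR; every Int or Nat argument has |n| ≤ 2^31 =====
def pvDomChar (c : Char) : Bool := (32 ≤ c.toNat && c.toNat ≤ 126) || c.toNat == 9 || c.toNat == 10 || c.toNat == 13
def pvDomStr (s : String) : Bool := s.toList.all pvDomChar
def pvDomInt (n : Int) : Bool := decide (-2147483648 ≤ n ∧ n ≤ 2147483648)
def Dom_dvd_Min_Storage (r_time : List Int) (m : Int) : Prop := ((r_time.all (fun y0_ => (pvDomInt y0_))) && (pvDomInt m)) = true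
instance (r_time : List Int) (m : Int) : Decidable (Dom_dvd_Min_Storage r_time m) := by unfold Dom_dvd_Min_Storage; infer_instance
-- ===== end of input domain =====

-- B replaces A's binary search over thresholds by an event-driven forward jump scan:
-- test t = 1, and while infeasible jump t to the smallest greedy overflow value (the
-- count function is constant below it). Loops are ported with a fuel counter that
-- provably exceeds each loop's iteration count.

-- ===== PORT A =====
-- helper dvd_Count, shared verbatim by both Python sources
def dvdCount (r_time : List Int) (mid_time : Int) : Int :=
  (r_time.foldl
    (fun (p : Int × Int) i => if p.2 + i > mid_time then (p.1 + 1, i) else (p.1, p.2 + i))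
    (1, 0)).1

-- A's while loop: min_time/max_time/result binary search (fuel only makes it total;
-- the entry point passes fuel > the measure (max_time + 1 - min_time).toNat, so the
-- fuel-exhausted branch is never taken)
def dvdMinLoopA (r_time : List Int) (m : Int) (fuel : Nat) (min_time max_time result : Int) : Int :=
  match fuel with
  | 0 => result
  | fuel + 1 =>
    if min_time ≤ max_time then
      let mid_time := PySem.Int.floordiv (min_time + max_time) 2
      if dvdCount r_time mid_time ≤ m then
        dvdMinLoopA r_time m fuel min_time (mid_time - 1) mid_time
      else
        dvdMinLoopA r_time m fuel (mid_time + 1) max_time result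
    else result

def dvd_Min_Storage (r_time : List Int) (m : Int) : Int :=
  dvdMinLoopA r_time m (r_time.sum.toNat + 1) 1 r_time.sum 0

-- ===== PORT B =====
-- Source B's next_change: smallest overflow value sum+i seen by the greedy run at
-- threshold t, or none when the run never overflows
def nextChange (r_time : List Int) (t : Int) : Option Int :=
  (r_time.foldl
    (fun (p : Option Int × Int) i =>
      if p.2 + i > t then
        (match p.1 with
         | none => some (p.2 + i)
         | some w => if p.2 + i < w then some (p.2 + i) else some w, i)
      else (p.1, p.2 + i))
    (none, 0)).1

-- Source B's while loop: first feasible t, jumping to the next breakpoint when infeasible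
-- (fuel > (total + 1 - t).toNat, so the fuel-exhausted branch is never taken)
def jumpLoopB (r_time : List Int) (m total : Int) (fuel : Nat) (t : Int) : Int :=
  match fuel with
  | 0 => 0
  | fuel + 1 =>
    if t ≤ total then
      if dvdCount r_time t ≤ m then t
      else
        match nextChange r_time t with
        | some w => jumpLoopB r_time m total fuel w
        | none => jumpLoopB r_time m total fuel (total + 1)
    else 0

def dvd_Min_Storage_alt (r_time : List Int) (m : Int) : Int :=
  let total := r_time.sum
  jumpLoopB r_time m total (total.toNat + 1) 1

-- ===== PRECONDITION & SPEC =====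
-- Pre_ excludes lists containing a negative time (A still returns there): with negative
-- times the greedy feasibility predicate is non-monotone, so the value A's binary search
-- returns is an accidental, probe-order-dependent midpoint that no search strategy is
-- bound to reproduce; the task's natural domain (storage sizes) is nonnegative.
def Pre_dvd_Min_Storage (r_time : List Int) (m : Int) : Prop := ∀ x ∈ r_time, 0 ≤ x
instance (r_time : List Int) (m : Int) : Decidable (Pre_dvd_Min_Storage r_time m) := by
  unfold Pre_dvd_Min_Storage; infer_instance

def pvWitness_dvd_Min_Storage : List Int × Int := ([80, 20, 50, 30, 40], 3)

def Spec_dvd_Min_Storage (r_time : List Int) (m : Int) (out : Int) : Prop := out = dvd_Min_Storage_alt r_time m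
instance (r_time : List Int) (m : Int) (out : Int) : Decidable (Spec_dvd_Min_Storage r_time m out) := by unfold Spec_dvd_Min_Storage; infer_instance

-- ===== CLAIM (what is proved, stated in full; the proofs are below) =====
def Claim_equal_dvd_Min_Storage : Prop := ∀ (r_time : List Int) (m : Int), Dom_dvd_Min_Storage r_time m → Pre_dvd_Min_Storage r_time m → Spec_dvd_Min_Storage r_time m (dvd_Min_Storage r_time m)

-- ===== LEMMAS AND PROOFS =====

theorem count_mono_aux (l : List Int) (t t' c s c' s' : Int)
    (hl : ∀ x ∈ l, 0 ≤ x) (htt : t ≤ t') (hs : 0 ≤ s) (hs' : 0 ≤ s')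
    (hc : c' ≤ c) (heq : c' = c → s' ≤ s) :
    (l.foldl (fun (p : Int × Int) i => if p.2 + i > t' then (p.1 + 1, i) else (p.1, p.2 + i)) (c', s')).1
      ≤ (l.foldl (fun (p : Int × Int) i => if p.2 + i > t then (p.1 + 1, i) else (p.1, p.2 + i)) (c, s)).1
    ∧ ((l.foldl (fun (p : Int × Int) i => if p.2 + i > t' then (p.1 + 1, i) else (p.1, p.2 + i)) (c', s')).1
        = (l.foldl (fun (p : Int × Int) i => if p.2 + i > t then (p.1 + 1, i) else (p.1, p.2 + i)) (c, s)).1 →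
       (l.foldl (fun (p : Int × Int) i => if p.2 + i > t' then (p.1 + 1, i) else (p.1, p.2 + i)) (c', s')).2
        ≤ (l.foldl (fun (p : Int × Int) i => if p.2 + i > t then (p.1 + 1, i) else (p.1, p.2 + i)) (c, s)).2) := by
  induction l generalizing c s c' s' with
  | nil => exact ⟨hc, heq⟩
  | cons i rest ih =>
    have hi : 0 ≤ i := hl i (by simp)
    have hrest : ∀ x ∈ rest, 0 ≤ x := fun x hx => hl x (by simp [hx])
    simp only [List.foldl_cons]
    by_cases h1 : s + i > t <;> by_cases h2 : s' + i > t' <;> simp only [h1, h2, if_pos, if_false]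
    · exact ih (c + 1) i (c' + 1) i hrest hi hi (by omega) (fun _ => le_refl _)
    · exact ih (c + 1) i c' (s' + i) hrest hi (by omega) (by omega) (by omega)
    · have hlt : c' < c := by
        by_contra hcon
        have : c' = c := by omega
        have := heq this
        omega
      exact ih c (s + i) (c' + 1) i hrest (by omega) hi (by omega) (by omega)
    · exact ih c (s + i) c' (s' + i) hrest (by omega) (by omega) hc (by omega)

theorem count_mono (r : List Int) (t t' : Int) (hr : ∀ x ∈ r, 0 ≤ x) (h : t ≤ t') :
    dvdCount r t' ≤ dvdCount r t :=
  (count_mono_aux r t t' 1 0 1 0 hr h le_rfl le_rfl le_rfl (fun _ => le_rfl)).1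

-- feasibility predicate monotone upward
theorem feas_mono (r : List Int) (m t t' : Int) (hr : ∀ x ∈ r, 0 ≤ x)
    (h : t ≤ t') (hf : dvdCount r t ≤ m) : dvdCount r t' ≤ m :=
  le_trans (count_mono r t t' hr h) hf

-- A's binary search when no threshold in [1,total] is feasible
theorem binS_zero (r : List Int) (m total : Int)
    (hnone : ∀ u, 1 ≤ u → u ≤ total → ¬ dvdCount r u ≤ m) :
    ∀ fuel lo hi, (hi + 1 - lo).toNat < fuel → 1 ≤ lo → hi ≤ total →
      dvdMinLoopA r m fuel lo hi 0 = 0 := by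
  intro fuel
  induction fuel with
  | zero => omega
  | succ n ih =>
    intro lo hi hfuel hlo hhi
    rw [dvdMinLoopA]
    split
    · next hle =>
      have hmid := PySem.Int.floordiv_two_mid_bounds (hle : lo ≤ hi)
      set mid := PySem.Int.floordiv (lo + hi) 2 with hm
      have hnf : ¬ dvdCount r mid ≤ m := hnone mid (by omega) (by omega)
      simp only [hnf, if_false]
      exact ih (mid + 1) hi (by omega) (by omega) hhi
    · rfl

-- A's binary search with a least feasible threshold L
theorem binS_spec (r : List Int) (m total L : Int) (hr : ∀ x ∈ r, 0 ≤ x)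
    (hL1 : 1 ≤ L) (hLt : L ≤ total) (hLf : dvdCount r L ≤ m)
    (hLleast : ∀ v, 1 ≤ v → v < L → ¬ dvdCount r v ≤ m) :
    ∀ fuel lo hi res, (hi + 1 - lo).toNat < fuel → 1 ≤ lo → lo ≤ L → hi ≤ total →
      (L ≤ hi ∨ res = L) → dvdMinLoopA r m fuel lo hi res = L := by
  intro fuel
  induction fuel with
  | zero => omega
  | succ n ih =>
    intro lo hi res hfuel h1 hloL hhi hor
    rw [dvdMinLoopA]
    split
    · next hle =>
      have hmid := PySem.Int.floordiv_two_mid_bounds (hle : lo ≤ hi)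
      set mid := PySem.Int.floordiv (lo + hi) 2 with hm
      by_cases hf : dvdCount r mid ≤ m
      · simp only [hf, if_true]
        have hLmid : L ≤ mid := by
          by_contra hcon
          exact hLleast mid (by omega) (by omega) hf
        exact ih lo (mid - 1) mid (by omega) h1 hloL (by omega) (by omega)
      · simp only [hf, if_false]
        have hmidL : mid < L := by
          by_contra hcon
          exact hf (feas_mono r m L mid hr (by omega) hLf)
        exact ih (mid + 1) hi res (by omega) (by omega) (by omega) hhi hor
    · next hgt =>
      rcases hor with h | h
      · omega
      · exact h

-- abbreviations for the two fold steps of B's helpers (count fold and min-overflow fold)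
-- stated as plain lambdas in each lemma so that `simp only [List.foldl_cons]` applies

-- once the min-overflow accumulator is `some u` it stays `some` and never increases
theorem nextFold_min_bound (t : Int) :
    ∀ (l : List Int) (s u : Int),
      ∃ w, (l.foldl
        (fun (p : Option Int × Int) i =>
          if p.2 + i > t then
            (match p.1 with
             | none => some (p.2 + i)
             | some w => if p.2 + i < w then some (p.2 + i) else some w, i)
          else (p.1, p.2 + i)) (some u, s)).1 = some w ∧ w ≤ u := by
  intro l
  induction l with
  | nil => intro s u; exact ⟨u, rfl, le_rfl⟩
  | cons i rest ih =>
    intro s u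
    simp only [List.foldl_cons]
    by_cases h : s + i > t
    · simp only [h, if_pos]
      by_cases h2 : s + i < u
      · simp only [h2, if_pos]
        obtain ⟨w, hw, hwle⟩ := ih i (s + i)
        exact ⟨w, hw, by omega⟩
      · simp only [h2, if_neg, if_false]
        exact ih i u
    · simp only [h, if_false]
      exact ih (s + i) u

-- every value the min-overflow fold can return exceeds t
theorem nextFold_gt (t : Int) :
    ∀ (l : List Int) (s : Int) (o : Option Int), (∀ w, o = some w → t < w) →
      ∀ w, (l.foldl
        (fun (p : Option Int × Int) i =>
          if p.2 + i > t then
            (match p.1 with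
             | none => some (p.2 + i)
             | some w => if p.2 + i < w then some (p.2 + i) else some w, i)
          else (p.1, p.2 + i)) (o, s)).1 = some w → t < w := by
  intro l
  induction l with
  | nil => intro s o ho w hw; exact ho w hw
  | cons i rest ih =>
    intro s o ho
    simp only [List.foldl_cons]
    by_cases h : s + i > t
    · simp only [h, if_pos]
      cases o with
      | none =>
        exact ih i (some (s + i)) (by intro w hw; injection hw with h'; omega)
      | some u =>
        by_cases h2 : s + i < u
        · simp only [h2, if_pos]
          exact ih i (some (s + i)) (by intro w hw; injection hw with h'; omega)
        · simp only [h2, if_neg, if_false]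
          exact ih i (some u) (by intro w hw; injection hw with h'; have := ho u rfl; omega)
    · simp only [h, if_false]
      exact ih (s + i) o ho

-- constancy: the count fold at any v with t ≤ v below every overflow value of the
-- run at t computes the same state as at t
theorem count_const_aux (t v : Int) (htv : t ≤ v) :
    ∀ (l : List Int) (c s : Int) (o : Option Int),
      (∀ w, (l.foldl
        (fun (p : Option Int × Int) i =>
          if p.2 + i > t then
            (match p.1 with
             | none => some (p.2 + i)
             | some w => if p.2 + i < w then some (p.2 + i) else some w, i)
          else (p.1, p.2 + i)) (o, s)).1 = some w → v < w) →
      l.foldl (fun (p : Int × Int) i => if p.2 + i > v then (p.1 + 1, i) else (p.1, p.2 + i)) (c, s)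
        = l.foldl (fun (p : Int × Int) i => if p.2 + i > t then (p.1 + 1, i) else (p.1, p.2 + i)) (c, s) := by
  intro l
  induction l with
  | nil => intro c s o _; rfl
  | cons i rest ih =>
    intro c s o ho
    simp only [List.foldl_cons] at *
    by_cases h : s + i > t
    · -- overflow at t; the final min is some w ≤ the new accumulator value ≤ s + i,
      -- and v < w, hence overflow at v too
      have hvsi : v < s + i := by
        cases o with
        | none =>
          simp only [h, if_pos] at ho
          obtain ⟨w, hw, hwle⟩ := nextFold_min_bound t rest i (s + i)
          have := ho w hw
          omega
        | some u =>
          simp only [h, if_pos] at ho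
          by_cases h2 : s + i < u
          · simp only [h2, if_pos] at ho
            obtain ⟨w, hw, hwle⟩ := nextFold_min_bound t rest i (s + i)
            have := ho w hw
            omega
          · simp only [h2, if_neg, if_false] at ho
            obtain ⟨w, hw, hwle⟩ := nextFold_min_bound t rest i u
            have := ho w hw
            omega
      have hv : s + i > v := hvsi
      simp only [h, hv, if_pos] at *
      cases o with
      | none => exact ih (c + 1) i (some (s + i)) ho
      | some u =>
        by_cases h2 : s + i < u
        · simp only [h2, if_pos] at ho
          exact ih (c + 1) i (some (s + i)) ho
        · simp only [h2, if_neg, if_false] at ho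
          exact ih (c + 1) i (some u) ho
    · have hv : ¬ s + i > v := by omega
      simp only [h, hv, if_false] at *
      exact ih c (s + i) o ho

theorem count_const (r : List Int) (t v : Int) (htv : t ≤ v)
    (ho : ∀ w, nextChange r t = some w → v < w) :
    dvdCount r v = dvdCount r t := by
  unfold dvdCount
  rw [count_const_aux t v htv r 1 0 none (by unfold nextChange at ho; exact ho)]

-- B's jump loop when no threshold in [1,total] is feasible
theorem jumpB_zero (r : List Int) (m total : Int)
    (hnone : ∀ u, 1 ≤ u → u ≤ total → ¬ dvdCount r u ≤ m) :
    ∀ fuel t, (total + 1 - t).toNat < fuel → 1 ≤ t →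
      jumpLoopB r m total fuel t = 0 := by
  intro fuel
  induction fuel with
  | zero => omega
  | succ n ih =>
    intro t hfuel ht
    rw [jumpLoopB]
    split
    · next hle =>
      have hnf : ¬ dvdCount r t ≤ m := hnone t ht hle
      simp only [hnf, if_false]
      cases hnc : nextChange r t with
      | none => exact ih (total + 1) (by omega) (by omega)
      | some w =>
        have hw : t < w := by
          unfold nextChange at hnc
          exact nextFold_gt t r 0 none (by intro w hw; cases hw) w hnc
        exact ih w (by omega) (by omega)
    · rfl

-- B's jump loop with a least feasible threshold L
theorem jumpB_spec (r : List Int) (m total L : Int)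
    (hL1 : 1 ≤ L) (hLt : L ≤ total) (hLf : dvdCount r L ≤ m)
    (hLleast : ∀ v, 1 ≤ v → v < L → ¬ dvdCount r v ≤ m) :
    ∀ fuel t, (total + 1 - t).toNat < fuel → 1 ≤ t → t ≤ L →
      jumpLoopB r m total fuel t = L := by
  intro fuel
  induction fuel with
  | zero => omega
  | succ n ih =>
    intro t hfuel ht htL
    rw [jumpLoopB]
    rw [if_pos (by omega : t ≤ total)]
    by_cases hf : dvdCount r t ≤ m
    · have hnlt : ¬ t < L := fun hlt => hLleast t ht hlt hf
      have hteq : t = L := by omega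
      subst hteq
      rw [if_pos hf]
    · have htL' : t < L := by
        rcases lt_or_eq_of_le htL with h | h
        · exact h
        · exact absurd (h ▸ hLf) hf
      simp only [hf, if_false]
      cases hnc : nextChange r t with
      | none =>
        exfalso
        have : dvdCount r L = dvdCount r t :=
          count_const r t L (by omega) (by intro w hw; rw [hnc] at hw; cases hw)
        omega
      | some w =>
        have hw : t < w := by
          unfold nextChange at hnc
          exact nextFold_gt t r 0 none (by intro w hw; cases hw) w hnc
        have hwL : w ≤ L := by
          by_contra hcon
          have : dvdCount r L = dvdCount r t :=
            count_const r t L (by omega)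
              (by intro w' hw'; rw [hnc] at hw'; injection hw' with h'; omega)
          omega
        exact ih w (by omega) (by omega) hwL

-- ===== VERDICT (by name: the statement is the Claim_ definition above) =====
theorem dvd_Min_Storage_spec : Claim_equal_dvd_Min_Storage := by
  intro r m _ hpre
  simp only [Spec_dvd_Min_Storage, dvd_Min_Storage, dvd_Min_Storage_alt]
  have htot : 0 ≤ r.sum := List.sum_nonneg hpre
  set total := r.sum with htdef
  by_cases hex : ∃ t, 1 ≤ t ∧ t ≤ total ∧ dvdCount r t ≤ m
  · -- a feasible threshold exists: both sides return the least one
    obtain ⟨L, ⟨hL1, hLt, hLf⟩, hLle⟩ :=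
      Int.exists_least_of_bdd (P := fun t => 1 ≤ t ∧ t ≤ total ∧ dvdCount r t ≤ m)
        ⟨1, fun z hz => hz.1⟩ hex
    have hLleast : ∀ v, 1 ≤ v → v < L → ¬ dvdCount r v ≤ m := by
      intro v h1 h2 hf
      have := hLle v ⟨h1, by omega, hf⟩
      omega
    have hA : dvdMinLoopA r m (total.toNat + 1) 1 total 0 = L :=
      binS_spec r m total L hpre hL1 hLt hLf hLleast (total.toNat + 1) 1 total 0
        (by omega) le_rfl hL1 le_rfl (Or.inl hLt)
    have hB : jumpLoopB r m total (total.toNat + 1) 1 = L :=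
      jumpB_spec r m total L hL1 hLt hLf hLleast (total.toNat + 1) 1 (by omega) le_rfl hL1
    rw [hA, hB]
  · -- nothing feasible: both sides return 0
    push_neg at hex
    have hnone : ∀ u, 1 ≤ u → u ≤ total → ¬ dvdCount r u ≤ m :=
      fun u h1 h2 hf => by have := hex u h1 h2; omega
    have hA : dvdMinLoopA r m (total.toNat + 1) 1 total 0 = 0 :=
      binS_zero r m total hnone (total.toNat + 1) 1 total (by omega) le_rfl le_rfl
    have hB : jumpLoopB r m total (total.toNat + 1) 1 = 0 :=
      jumpB_zero r m total hnone (total.toNat + 1) 1 (by omega) le_rfl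
    rw [hA, hB]
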